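-- pv_equiv track=rewrite | github.com/antecedent/k-mtslia | k_mtslia.py | map_k_gram_to_blockers
-- ===== SOURCE A (Python) =====
-- def map_k_gram_to_blockers(k_gram, data, edges):
--     k = len(k_gram)
--     projection = []
--     for m, datum in enumerate(data):
--         projection += [(m, -1, edges[0]) for i in range(k - 1)]
--         for n, segment in enumerate(datum):
--             if segment in k_gram:
--                 projection += [(m, n, segment)]
--         projection += [(m, len(datum), edges[1]) for i in range(k - 1)]
--     blocker_cnf = set()
--     for offset in range(len(projection) - k + 1):
--         M, N, segments = zip(*projection[offset:(offset + k)])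
--         if segments == k_gram and all(m == M[0] for m in M):
--             blocker_clause = set()
--             for n1, n2 in zip(N[:-1], N[1:]):
--                 blocker_clause |= set(data[M[0]][(n1 + 1):n2])
--             blocker_cnf.add(tuple(sorted(blocker_clause)))
--     return k_gram, tuple(sorted(set(blocker_cnf)))
-- ===== SOURCE B (Python) =====
-- # KMP matching over each datum's filtered token stream instead of A's global m-tagged
-- # projection with a per-offset k-window rebuild-and-compare: a different algorithm
-- # (no k-window is materialised or compared; no unqualified speed claim).
-- def map_k_gram_to_blockers(k_gram, data, edges):
--     k = len(k_gram)
--     pattern = list(k_gram)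
--     # KMP failure table: fail[i] = length of the longest proper border of pattern[:i+1]
--     fail = [0] * k
--     q = 0
--     for i in range(1, k):
--         while q > 0 and pattern[i] != pattern[q]:
--             q = fail[q - 1]
--         if pattern[i] == pattern[q]:
--             q += 1
--         fail[i] = q
--     kset = set(pattern)
--     if k > 1 and data:
--         lpad, rpad = [edges[0]] * (k - 1), [edges[1]] * (k - 1)
--     else:
--         lpad, rpad = [], []
--     cnf = set()
--     for datum in data:
--         hits = [(n, s) for n, s in enumerate(datum) if s in kset]
--         toks = lpad + [s for _, s in hits] + rpad
--         pos = [-1] * (k - 1) + [n for n, _ in hits] + [len(datum)] * (k - 1)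
--         q = 0
--         for j, tok in enumerate(toks):
--             while q > 0 and tok != pattern[q]:
--                 q = fail[q - 1]
--             if tok == pattern[q]:
--                 q += 1
--             if q == k:
--                 ps = pos[j - k + 1 : j + 1]
--                 clause = set()
--                 for n1, n2 in zip(ps, ps[1:]):
--                     clause |= set(datum[n1 + 1 : n2])
--                 cnf.add(tuple(sorted(clause)))
--                 q = fail[q - 1]
--     return k_gram, tuple(sorted(cnf))
-- ===== Notes on version B (the rewrite author's own statement) =====
-- stated objective: alternative
-- what changed: Replaces A's global m-tagged projection plus per-offset zip(*window) rebuild-and-compare with a per-datum KMP automaton (failure table built once) run over each datum's filtered token stream, so no k-window is ever materialised or compared (matching is O(P) instead of O(P*k), but shared clause-building dominates on dense inputs, measured ~1.3x at large sizes, below the 1.5x bar, so no speed claim).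
import Mathlib
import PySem

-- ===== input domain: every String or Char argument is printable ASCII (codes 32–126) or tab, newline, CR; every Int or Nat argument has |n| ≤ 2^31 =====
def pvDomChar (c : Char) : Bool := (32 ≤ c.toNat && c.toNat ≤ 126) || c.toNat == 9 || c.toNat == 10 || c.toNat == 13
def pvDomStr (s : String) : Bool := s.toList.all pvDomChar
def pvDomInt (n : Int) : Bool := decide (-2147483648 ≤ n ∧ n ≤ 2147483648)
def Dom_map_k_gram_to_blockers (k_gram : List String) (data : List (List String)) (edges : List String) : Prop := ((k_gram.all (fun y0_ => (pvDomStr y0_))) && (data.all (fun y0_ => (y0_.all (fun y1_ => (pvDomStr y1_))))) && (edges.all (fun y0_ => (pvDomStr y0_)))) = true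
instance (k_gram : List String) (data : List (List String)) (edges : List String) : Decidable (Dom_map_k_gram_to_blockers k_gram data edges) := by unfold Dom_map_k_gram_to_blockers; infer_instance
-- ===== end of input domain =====

-- B replaces A's global m-tagged projection + per-offset zip(*window) rebuild-and-compare by a
-- per-datum KMP automaton run over the filtered token stream (a different algorithm; measured
-- ~1.3x at large sizes, below the 1.5x bar, so no speed claim).


-- ===== PORT A =====
-- Literal transliteration of A. k_gram and edges are Python tuples of strings (List String here).
-- `projection += [...]` loops become foldl-appends; `range(...)` is PySem.List.pyRange;
-- `projection[offset:offset+k]` is PySem.List.slice; `zip(*window)` is the three maps;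
-- edges[0]/edges[1]/data[M[0]] use pyGetD (IndexError inputs are excluded by Pre_ below);
-- M[0] inside `all` is pyGetD (Python only evaluates it lazily; Pre_ keeps windows nonempty).
def map_k_gram_to_blockers (k_gram : List String) (data : List (List String)) (edges : List String) : List String × List (List String) :=
  let k : Int := PySem.List.len k_gram
  let projection : List (Int × Int × String) :=
    (PySem.List.enumerate data).foldl (fun proj md =>
      ((PySem.List.enumerate md.2).foldl
          (fun pr ns => if k_gram.contains ns.2 then pr ++ [(md.1, ns.1, ns.2)] else pr)
          (proj ++ (PySem.List.pyRange 0 (k - 1) 1).map (fun _ => (md.1, (-1 : Int), PySem.List.pyGetD edges 0 ""))))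
        ++ (PySem.List.pyRange 0 (k - 1) 1).map (fun _ => (md.1, PySem.List.len md.2, PySem.List.pyGetD edges 1 ""))) []
  let blocker_cnf : PySem.Set (List String) :=
    (PySem.List.pyRange 0 (PySem.List.len projection - k + 1) 1).foldl (fun acc offset =>
      let window := PySem.List.slice projection (some offset) (some (offset + k))
      let M := window.map (fun t => t.1)
      let N := window.map (fun t => t.2.1)
      let segments := window.map (fun t => t.2.2)
      if segments == k_gram && M.all (fun m => m == PySem.List.pyGetD M 0 0) then
        let blocker_clause : PySem.Set String :=
          (List.zip (PySem.List.slice N none (some (-1))) (PySem.List.slice N (some 1) none)).foldl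
            (fun cl p => PySem.Set.union cl (PySem.Set.ofList
              (PySem.List.slice (PySem.List.pyGetD data (PySem.List.pyGetD M 0 0) []) (some (p.1 + 1)) (some p.2))))
            PySem.Set.empty
        PySem.Set.add acc (PySem.List.sorted blocker_clause (fun x => x) false)
      else acc) PySem.Set.empty
  (k_gram, PySem.List.sorted (PySem.Set.ofList blocker_cnf) (fun x => x) false)

-- ===== PORT B =====
-- Literal transliteration of Source B, a per-datum KMP scan: pvShrink is the inner
-- `while q > 0 and tok != pattern[q]: q = fail[q-1]` loop (fuel = the starting q, which the
-- loop strictly decreases, so fuel q is exact); pvFail is the failure-table loop.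
def pvShrink (pattern : List String) (fail : List Nat) (c : String) : Nat → Nat → Nat
  | 0, q => q
  | fuel + 1, q =>
    if q != 0 && !(c == PySem.List.pyGetD pattern (q : Int) "") then
      pvShrink pattern fail c fuel (fail.getD (q - 1) 0)
    else q

def pvFail (pattern : List String) : List Nat :=
  ((PySem.List.pyRange 1 (PySem.List.len pattern) 1).foldl
    (fun (st : List Nat × Nat) i =>
      let c := PySem.List.pyGetD pattern i ""
      let q1 := pvShrink pattern st.1 c st.2 st.2
      let q2 := if c == PySem.List.pyGetD pattern (q1 : Int) "" then q1 + 1 else q1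
      (st.1.set i.toNat q2, q2))
    (List.replicate pattern.length 0, 0)).1

def map_k_gram_to_blockers_alt (k_gram : List String) (data : List (List String)) (edges : List String) : List String × List (List String) :=
  let k := k_gram.length
  let pattern := k_gram
  let fail := pvFail pattern
  let kset : PySem.Set String := PySem.Set.ofList pattern
  let pads : List String × List String :=
    if 1 < k && !data.isEmpty then
      (List.replicate (k - 1) (PySem.List.pyGetD edges 0 ""),
       List.replicate (k - 1) (PySem.List.pyGetD edges 1 ""))
    else ([], [])
  let cnf : PySem.Set (List String) :=
    data.foldl (fun cnf datum =>
      let hits := (PySem.List.enumerate datum).filter (fun p => PySem.Set.contains kset p.2)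
      let toks := pads.1 ++ hits.map (fun p => p.2) ++ pads.2
      let pos : List Int := List.replicate (k - 1) (-1) ++ hits.map (fun p => p.1)
                   ++ List.replicate (k - 1) (PySem.List.len datum)
      ((PySem.List.enumerate toks).foldl
        (fun (st : Nat × PySem.Set (List String)) jt =>
          let q1 := pvShrink pattern fail jt.2 st.1 st.1
          let q2 := if jt.2 == PySem.List.pyGetD pattern (q1 : Int) "" then q1 + 1 else q1
          if q2 == k then
            let ps := PySem.List.slice pos (some (jt.1 - (k : Int) + 1)) (some (jt.1 + 1))
            let clause := (List.zip ps (PySem.List.slice ps (some 1) none)).foldl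
              (fun cl pr => PySem.Set.union cl (PySem.Set.ofList
                (PySem.List.slice datum (some (pr.1 + 1)) (some pr.2)))) PySem.Set.empty
            (fail.getD (k - 1) 0, PySem.Set.add st.2 (PySem.List.sorted clause (fun x => x) false))
          else (q2, st.2))
        (0, cnf)).2) PySem.Set.empty
  (k_gram, PySem.List.sorted cnf (fun x => x) false)

-- ===== PRECONDITION & SPEC =====
-- Pre_ excludes exactly the inputs where A raises: k_gram = () (ValueError: unpacking zip(*[])
-- of an empty window) and k ≥ 2 with nonempty data but fewer than two edge symbols (IndexError).
def Pre_map_k_gram_to_blockers (k_gram : List String) (data : List (List String)) (edges : List String) : Prop :=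
  k_gram ≠ [] ∧ (1 < k_gram.length → data ≠ [] → 2 ≤ edges.length)
instance (k_gram : List String) (data : List (List String)) (edges : List String) : Decidable (Pre_map_k_gram_to_blockers k_gram data edges) := by unfold Pre_map_k_gram_to_blockers; infer_instance

def pvWitness_map_k_gram_to_blockers : List String × List (List String) × List String :=
  (["a", "b"], [["a", "b", "c"], ["c"]], ["<", ">"])

def Spec_map_k_gram_to_blockers (k_gram : List String) (data : List (List String)) (edges : List String) (out : List String × List (List String)) : Prop := out = map_k_gram_to_blockers_alt k_gram data edges
instance (k_gram : List String) (data : List (List String)) (edges : List String) (out : List String × List (List String)) : Decidable (Spec_map_k_gram_to_blockers k_gram data edges out) := by unfold Spec_map_k_gram_to_blockers; infer_instance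

-- ===== CLAIM (what is proved, stated in full; the proofs are below) =====
def Claim_equal_map_k_gram_to_blockers : Prop := ∀ (k_gram : List String) (data : List (List String)) (edges : List String), Dom_map_k_gram_to_blockers k_gram data edges → Pre_map_k_gram_to_blockers k_gram data edges → Spec_map_k_gram_to_blockers k_gram data edges (map_k_gram_to_blockers k_gram data edges)

-- ===== LEMMAS AND PROOFS =====

-- Shared shapes of both programs, named for the proofs.
def pvHits (k_gram : List String) (datum : List String) : List (Int × String) :=
  (PySem.List.enumerate datum).filter (fun p => k_gram.contains p.2)

def pvBlk (k_gram : List String) (edges : List String) (m : Int) (datum : List String) : List (Int × Int × String) :=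
  List.replicate (k_gram.length - 1) (m, (-1 : Int), PySem.List.pyGetD edges 0 "")
    ++ (pvHits k_gram datum).map (fun p => (m, p.1, p.2))
    ++ List.replicate (k_gram.length - 1) (m, PySem.List.len datum, PySem.List.pyGetD edges 1 "")

def pvF (k_gram : List String) (edges : List String) (s : Int) (ds : List (List String)) : List (Int × Int × String) :=
  (PySem.List.enumerate ds s).flatMap (fun md => pvBlk k_gram edges md.1 md.2)

def pvSegs (k_gram : List String) (edges : List String) (datum : List String) : List String :=
  List.replicate (k_gram.length - 1) (PySem.List.pyGetD edges 0 "")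
    ++ (pvHits k_gram datum).map (fun p => p.2)
    ++ List.replicate (k_gram.length - 1) (PySem.List.pyGetD edges 1 "")

def pvPos (k_gram : List String) (datum : List String) : List Int :=
  List.replicate (k_gram.length - 1) (-1 : Int)
    ++ (pvHits k_gram datum).map (fun p => p.1)
    ++ List.replicate (k_gram.length - 1) (PySem.List.len datum)

def pvClause (datum : List String) (np : List (Int × Int)) : PySem.Set String :=
  np.foldl (fun cl p => PySem.Set.union cl (PySem.Set.ofList
    (PySem.List.slice datum (some (p.1 + 1)) (some p.2)))) PySem.Set.empty

def pvTup (datum : List String) (np : List (Int × Int)) : List String :=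
  PySem.List.sorted (pvClause datum np) (fun x => x) false

def pvWinA (k_gram : List String) (data : List (List String)) (edges : List String) (off : Int) : List (Int × Int × String) :=
  PySem.List.slice (pvF k_gram edges 0 data) (some off) (some (off + PySem.List.len k_gram))

def pvCondA (k_gram : List String) (data : List (List String)) (edges : List String) (off : Int) : Bool :=
  ((pvWinA k_gram data edges off).map (fun t => t.2.2) == k_gram) &&
    ((pvWinA k_gram data edges off).map (fun t => t.1)).all
      (fun m => m == PySem.List.pyGetD ((pvWinA k_gram data edges off).map (fun t => t.1)) 0 0)

def pvTupA (k_gram : List String) (data : List (List String)) (edges : List String) (off : Int) : List String :=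
  pvTup (PySem.List.pyGetD data (PySem.List.pyGetD ((pvWinA k_gram data edges off).map (fun t => t.1)) 0 0) [])
    (List.zip (PySem.List.slice ((pvWinA k_gram data edges off).map (fun t => t.2.1)) none (some (-1)))
              (PySem.List.slice ((pvWinA k_gram data edges off).map (fun t => t.2.1)) (some 1) none))

def pvCondB (k_gram : List String) (edges : List String) (datum : List String) (i : Int) : Bool :=
  PySem.List.slice (pvSegs k_gram edges datum) (some i) (some (i + PySem.List.len k_gram)) == k_gram

def pvTupB (k_gram : List String) (edges : List String) (datum : List String) (i : Int) : List String :=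
  pvTup datum
    (List.zip (PySem.List.slice (pvPos k_gram datum) (some i) (some (i + PySem.List.len k_gram - 1)))
              (PySem.List.slice (pvPos k_gram datum) (some (i + 1)) (some (i + PySem.List.len k_gram))))

def pvCnfA (k_gram : List String) (data : List (List String)) (edges : List String) : PySem.Set (List String) :=
  (PySem.List.pyRange 0 (PySem.List.len (pvF k_gram edges 0 data) - PySem.List.len k_gram + 1) 1).foldl
    (fun acc off => if pvCondA k_gram data edges off then PySem.Set.add acc (pvTupA k_gram data edges off) else acc)
    PySem.Set.empty

def pvCnfB (k_gram : List String) (data : List (List String)) (edges : List String) : PySem.Set (List String) :=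
  data.foldl (fun acc datum =>
    (PySem.List.pyRange 0 (PySem.List.len (pvSegs k_gram edges datum) - PySem.List.len k_gram + 1) 1).foldl
      (fun acc i => if pvCondB k_gram edges datum i then PySem.Set.add acc (pvTupB k_gram edges datum i) else acc)
      acc) PySem.Set.empty

-- B-side named shapes: the match tuple at end position j, the scan step, and the cnf fold.
def pvTupK (datum : List String) (pos : List Int) (k : Nat) (j : Int) : List String :=
  let ps := PySem.List.slice pos (some (j - (k : Int) + 1)) (some (j + 1))
  pvTup datum (List.zip ps (PySem.List.slice ps (some 1) none))

def pvScanStep (p : List String) (F : List Nat) (k : Nat) (datum : List String) (pos : List Int)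
    (st : Nat × PySem.Set (List String)) (jt : Int × String) : Nat × PySem.Set (List String) :=
  let q1 := pvShrink p F jt.2 st.1 st.1
  let q2 := if jt.2 == PySem.List.pyGetD p (q1 : Int) "" then q1 + 1 else q1
  if q2 == k then (F.getD (k - 1) 0, PySem.Set.add st.2 (pvTupK datum pos k jt.1))
  else (q2, st.2)

def pvCnfK (k_gram : List String) (data : List (List String)) (edges : List String) : PySem.Set (List String) :=
  data.foldl (fun cnf datum =>
    ((PySem.List.enumerate (pvSegs k_gram edges datum)).foldl
      (pvScanStep k_gram (pvFail k_gram) k_gram.length datum (pvPos k_gram datum)) (0, cnf)).2) PySem.Set.empty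

-- the KMP step in named form, and the loop-state invariant "q is the longest bounded border"
def pvStep (p : List String) (F : List Nat) (c : String) (q : Nat) : Nat :=
  let q1 := pvShrink p F c q q
  if c == PySem.List.pyGetD p (q1 : Int) "" then q1 + 1 else q1

def pvMaxB (p t : List String) (b q : Nat) : Prop :=
  q ≤ b ∧ p.take q <:+ t ∧ ∀ l, l ≤ b → p.take l <:+ t → l ≤ q

-- generic membership / nodup facts about conditional Set.add folds
lemma pv_mem_foldl_condAdd {α β : Type} [BEq α] [LawfulBEq α] (p : β → Bool) (f : β → α) :
    ∀ (l : List β) (s : PySem.Set α) (y : α),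
      (y ∈ l.foldl (fun s b => if p b then PySem.Set.add s (f b) else s) s) ↔
        y ∈ s ∨ ∃ b ∈ l, p b ∧ y = f b := by
  intro l
  induction l with
  | nil => simp
  | cons b l ih =>
    intro s y
    simp only [List.foldl_cons]
    rw [ih]
    by_cases hp : p b
    · rw [if_pos hp, PySem.Set.mem_add]
      constructor
      · rintro ((h | rfl) | ⟨b', hb', hpb, rfl⟩)
        · exact Or.inl h
        · exact Or.inr ⟨b, List.mem_cons_self .., hp, rfl⟩
        · exact Or.inr ⟨b', List.mem_cons_of_mem _ hb', hpb, rfl⟩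
      · rintro (h | ⟨b', hb', hpb, rfl⟩)
        · exact Or.inl (Or.inl h)
        · rcases List.mem_cons.1 hb' with rfl | hb'
          · exact Or.inl (Or.inr rfl)
          · exact Or.inr ⟨b', hb', hpb, rfl⟩
    · rw [if_neg hp]
      constructor
      · rintro (h | ⟨b', hb', hpb, rfl⟩)
        · exact Or.inl h
        · exact Or.inr ⟨b', List.mem_cons_of_mem _ hb', hpb, rfl⟩
      · rintro (h | ⟨b', hb', hpb, rfl⟩)
        · exact Or.inl h
        · rcases List.mem_cons.1 hb' with rfl | hb'
          · exact absurd hpb hp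
          · exact Or.inr ⟨b', hb', hpb, rfl⟩

lemma pv_mem_foldl2 {α β γ : Type} [BEq α] [LawfulBEq α] (r : γ → List β) (p : γ → β → Bool) (f : γ → β → α) :
    ∀ (l : List γ) (s : PySem.Set α) (y : α),
      (y ∈ l.foldl (fun s g => (r g).foldl (fun s b => if p g b then PySem.Set.add s (f g b) else s) s) s) ↔
        y ∈ s ∨ ∃ g ∈ l, ∃ b ∈ r g, p g b ∧ y = f g b := by
  intro l
  induction l with
  | nil => simp
  | cons g l ih =>
    intro s y
    simp only [List.foldl_cons]
    rw [ih, pv_mem_foldl_condAdd]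
    constructor
    · rintro (((h | ⟨b, hb, hpb, rfl⟩) | ⟨g', hg', b, hb, hpb, rfl⟩))
      · exact Or.inl h
      · exact Or.inr ⟨g, List.mem_cons_self .., b, hb, hpb, rfl⟩
      · exact Or.inr ⟨g', List.mem_cons_of_mem _ hg', b, hb, hpb, rfl⟩
    · rintro (h | ⟨g', hg', b, hb, hpb, rfl⟩)
      · exact Or.inl (Or.inl h)
      · rcases List.mem_cons.1 hg' with rfl | hg'
        · exact Or.inl (Or.inr ⟨b, hb, hpb, rfl⟩)
        · exact Or.inr ⟨g', hg', b, hb, hpb, rfl⟩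

-- sorted does not depend on the DecidableLT instance
lemma pv_sorted_dec_irrel {α κ : Type} [LT κ] (d₁ d₂ : DecidableLT κ) (xs : List α) (key : α → κ) (rev : Bool) :
    @PySem.List.sorted α κ _ d₁ xs key rev = @PySem.List.sorted α κ _ d₂ xs key rev := by
  have h : d₁ = d₂ := by
    funext a b
    exact Subsingleton.elim _ _
  rw [h]

-- structural facts
lemma pvF_nil (k_gram edges : List String) (s : Int) : pvF k_gram edges s [] = [] := by
  simp [pvF, PySem.List.enumerate_nil]

lemma pvF_cons (k_gram edges : List String) (s : Int) (d : List String) (tl : List (List String)) :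
    pvF k_gram edges s (d :: tl) = pvBlk k_gram edges s d ++ pvF k_gram edges (s + 1) tl := by
  simp [pvF, PySem.List.enumerate_cons]

lemma pv_fst_mem_pvBlk {k_gram edges : List String} {m : Int} {d : List String}
    {x : Int × Int × String} (hx : x ∈ pvBlk k_gram edges m d) : x.1 = m := by
  simp only [pvBlk, List.mem_append, List.mem_replicate, List.mem_map] at hx
  obtain (⟨-, h⟩ | ⟨p, -, h⟩) | ⟨-, h⟩ := hx <;> subst h <;> rfl

lemma pv_fst_mem_pvF {k_gram edges : List String} :
    ∀ {ds : List (List String)} {s : Int} {x : Int × Int × String}, x ∈ pvF k_gram edges s ds → s ≤ x.1 := by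
  intro ds
  induction ds with
  | nil => intro s x hx; simp [pvF_nil] at hx
  | cons d tl ih =>
    intro s x hx
    rw [pvF_cons, List.mem_append] at hx
    rcases hx with h | h
    · exact le_of_eq (pv_fst_mem_pvBlk h).symm
    · have := ih h; omega

lemma pv_map_const_pyRange {α : Type} (xs : List String) (c : α) :
    (PySem.List.pyRange 0 (PySem.List.len xs - 1) 1).map (fun _ => c) = List.replicate (xs.length - 1) c := by
  rw [List.map_const', PySem.List.length_pyRange_one]
  congr 1
  simp only [PySem.List.len_eq]
  omega

-- A's projection loop builds exactly the flattened block list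
lemma pv_foldl_blocks (k_gram edges : List String) :
    ∀ (l : List (Int × List String)) (acc : List (Int × Int × String)),
      l.foldl (fun proj md =>
        ((PySem.List.enumerate md.2).foldl
            (fun pr ns => if k_gram.contains ns.2 then pr ++ [(md.1, ns.1, ns.2)] else pr)
            (proj ++ (PySem.List.pyRange 0 (PySem.List.len k_gram - 1) 1).map (fun _ => (md.1, (-1 : Int), PySem.List.pyGetD edges 0 ""))))
          ++ (PySem.List.pyRange 0 (PySem.List.len k_gram - 1) 1).map (fun _ => (md.1, PySem.List.len md.2, PySem.List.pyGetD edges 1 ""))) acc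
      = acc ++ l.flatMap (fun md => pvBlk k_gram edges md.1 md.2) := by
  intro l
  induction l with
  | nil => intro acc; simp
  | cons md l ih =>
    intro acc
    rw [List.foldl_cons, ih, List.flatMap_cons]
    rw [PySem.List.foldl_append_if (fun (ns : Int × String) => k_gram.contains ns.2)
          (fun (ns : Int × String) => (md.1, ns.1, ns.2)) (PySem.List.enumerate md.2)]
    simp only [pvBlk, pvHits, pv_map_const_pyRange, List.append_assoc]

-- the A port, in named form
lemma pv_contains_ofList (k_gram : List String) (x : String) :
    PySem.Set.contains (PySem.Set.ofList k_gram) x = k_gram.contains x := by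
  by_cases h : x ∈ k_gram <;>
    simp [PySem.Set.contains_eq_listContains, List.contains_iff_mem, PySem.Set.mem_ofList, h]

lemma pv_portA_eq (k_gram : List String) (data : List (List String)) (edges : List String) :
    map_k_gram_to_blockers k_gram data edges
      = (k_gram, PySem.List.sorted (PySem.Set.ofList (pvCnfA k_gram data edges)) (fun x => x) false) := by
  simp only [map_k_gram_to_blockers]
  rw [pv_foldl_blocks k_gram edges (PySem.List.enumerate data) []]
  simp only [List.nil_append]
  rfl

-- the B port, in named form (for nonempty data; empty data is handled separately)
lemma pv_portK_eq (k_gram : List String) (data : List (List String)) (edges : List String) (hd : data ≠ []) :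
    map_k_gram_to_blockers_alt k_gram data edges
      = (k_gram, PySem.List.sorted (pvCnfK k_gram data edges) (fun x => x) false) := by
  have hpad : (if 1 < k_gram.length && !data.isEmpty then
      (List.replicate (k_gram.length - 1) (PySem.List.pyGetD edges 0 ""),
       List.replicate (k_gram.length - 1) (PySem.List.pyGetD edges 1 ""))
    else (([] : List String), ([] : List String)))
      = (List.replicate (k_gram.length - 1) (PySem.List.pyGetD edges 0 ""),
         List.replicate (k_gram.length - 1) (PySem.List.pyGetD edges 1 "")) := by
    by_cases h : 1 < k_gram.length
    · have hc : (1 < k_gram.length && !data.isEmpty) = true := by simp [h, hd]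
      rw [if_pos hc]
    · have h0 : k_gram.length - 1 = 0 := by omega
      rw [h0]
      by_cases hc : (1 < k_gram.length && !data.isEmpty) = true
      · rw [if_pos hc]
      · rw [if_neg hc]
        simp
  simp only [map_k_gram_to_blockers_alt, hpad, pv_contains_ofList]
  rfl

-- window decomposition: a same-tag window of the flattened projection lies inside one block
lemma pv_split (k_gram edges : List String) (hk : 1 ≤ k_gram.length) :
    ∀ (ds : List (List String)) (s : Int) (o : Nat) (mv : Int),
      o + k_gram.length ≤ (pvF k_gram edges s ds).length →
      (∀ x ∈ ((pvF k_gram edges s ds).drop o).take k_gram.length, x.1 = mv) →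
      ∃ (j : Nat) (datum : List String) (i : Nat), ds[j]? = some datum ∧
        i + k_gram.length ≤ (pvBlk k_gram edges (s + j) datum).length ∧
        ((pvF k_gram edges s ds).drop o).take k_gram.length
          = ((pvBlk k_gram edges (s + j) datum).drop i).take k_gram.length := by
  intro ds
  induction ds with
  | nil =>
    intro s o mv hlen _
    rw [pvF_nil] at hlen
    simp only [List.length_nil] at hlen
    exfalso
    omega
  | cons d tl ih =>
    intro s o mv hlen hsame
    rw [pvF_cons] at hlen hsame ⊢
    by_cases h1 : o + k_gram.length ≤ (pvBlk k_gram edges s d).length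
    · refine ⟨0, d, o, rfl, ?_, ?_⟩
      · simpa using h1
      · rw [List.drop_append_of_le_length (by omega),
            List.take_append_of_le_length (by simp only [List.length_drop]; omega)]
        norm_num
    · by_cases h2 : (pvBlk k_gram edges s d).length ≤ o
      · have hlen' : (o - (pvBlk k_gram edges s d).length) + k_gram.length
            ≤ (pvF k_gram edges (s + 1) tl).length := by
          simp only [List.length_append] at hlen; omega
        have hdrop : (pvBlk k_gram edges s d ++ pvF k_gram edges (s + 1) tl).drop o
            = (pvF k_gram edges (s + 1) tl).drop (o - (pvBlk k_gram edges s d).length) := by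
          conv_lhs => rw [show o = (pvBlk k_gram edges s d).length + (o - (pvBlk k_gram edges s d).length) by omega]
          exact List.drop_length_add_append _
        have hsame' : ∀ x ∈ ((pvF k_gram edges (s + 1) tl).drop (o - (pvBlk k_gram edges s d).length)).take k_gram.length, x.1 = mv := by
          intro x hx
          exact hsame x (by rw [hdrop]; exact hx)
        obtain ⟨j, datum, i, hj, hbound, heq⟩ := ih (s + 1) (o - (pvBlk k_gram edges s d).length) mv hlen' hsame'
        have hc : s + ((j + 1 : Nat) : Int) = (s + 1) + (j : Int) := by push_cast; ring
        refine ⟨j + 1, datum, i, by simpa using hj, ?_, ?_⟩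
        · rw [hc]; exact hbound
        · rw [hdrop, hc]; exact heq
      · exfalso
        push_neg at h1 h2
        have hrlen : k_gram.length - ((pvBlk k_gram edges s d).length - o)
            ≤ (pvF k_gram edges (s + 1) tl).length := by
          simp only [List.length_append] at hlen; omega
        have hwin : ((pvBlk k_gram edges s d ++ pvF k_gram edges (s + 1) tl).drop o).take k_gram.length
            = (pvBlk k_gram edges s d).drop o
              ++ (pvF k_gram edges (s + 1) tl).take (k_gram.length - ((pvBlk k_gram edges s d).length - o)) := by
          rw [List.drop_append_of_le_length (by omega), List.take_append,
              List.take_of_length_le (by simp only [List.length_drop]; omega)]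
          congr 2
          simp only [List.length_drop]
        have hbne : (pvBlk k_gram edges s d).drop o ≠ [] := by
          have : 0 < ((pvBlk k_gram edges s d).drop o).length := by
            simp only [List.length_drop]; omega
          exact List.ne_nil_of_length_pos this
        have hrne : (pvF k_gram edges (s + 1) tl).take (k_gram.length - ((pvBlk k_gram edges s d).length - o)) ≠ [] := by
          have : 0 < ((pvF k_gram edges (s + 1) tl).take (k_gram.length - ((pvBlk k_gram edges s d).length - o))).length := by
            simp only [List.length_take]
            omega
          exact List.ne_nil_of_length_pos this
        have hx1 : (((pvBlk k_gram edges s d).drop o).head hbne).1 = s :=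
          pv_fst_mem_pvBlk (List.mem_of_mem_drop (List.head_mem hbne))
        have hy1 : s + 1 ≤ (((pvF k_gram edges (s + 1) tl).take (k_gram.length - ((pvBlk k_gram edges s d).length - o))).head hrne).1 :=
          pv_fst_mem_pvF (List.mem_of_mem_take (List.head_mem hrne))
        have hxw := hsame _ (by rw [hwin]; exact List.mem_append_left _ (List.head_mem hbne))
        have hyw := hsame _ (by rw [hwin]; exact List.mem_append_right _ (List.head_mem hrne))
        have e1 : s = mv := hx1 ▸ hxw
        have e2 : s + 1 ≤ mv := hyw ▸ hy1
        omega

-- window composition: a window of one block is a window of the flattened projection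
lemma pv_compose (k_gram edges : List String) :
    ∀ (ds : List (List String)) (s : Int) (j i : Nat) (datum : List String),
      ds[j]? = some datum →
      i + k_gram.length ≤ (pvBlk k_gram edges (s + j) datum).length →
      ∃ o : Nat, o + k_gram.length ≤ (pvF k_gram edges s ds).length ∧
        ((pvF k_gram edges s ds).drop o).take k_gram.length
          = ((pvBlk k_gram edges (s + j) datum).drop i).take k_gram.length := by
  intro ds
  induction ds with
  | nil => intro s j i datum hj; simp at hj
  | cons d tl ih =>
    intro s j i datum hj hbound
    cases j with
    | zero =>
      rw [List.getElem?_cons_zero] at hj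
      obtain rfl : d = datum := by injection hj
      simp only [Nat.cast_zero, add_zero] at hbound ⊢
      refine ⟨i, ?_, ?_⟩
      · rw [pvF_cons]; simp only [List.length_append]; omega
      · rw [pvF_cons, List.drop_append_of_le_length (by omega),
            List.take_append_of_le_length (by simp only [List.length_drop]; omega)]
    | succ j =>
      rw [List.getElem?_cons_succ] at hj
      have hc : s + ((j + 1 : Nat) : Int) = (s + 1) + (j : Int) := by push_cast; ring
      rw [hc] at hbound ⊢
      obtain ⟨o, ho, heq⟩ := ih (s + 1) j i datum hj hbound
      refine ⟨(pvBlk k_gram edges s d).length + o, ?_, ?_⟩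
      · rw [pvF_cons]; simp only [List.length_append]; omega
      · rw [pvF_cons, List.drop_length_add_append, heq]

lemma pvSegs_eq_map (k_gram edges : List String) (m : Int) (datum : List String) :
    pvSegs k_gram edges datum = (pvBlk k_gram edges m datum).map (fun t => t.2.2) := by
  simp [pvSegs, pvBlk, List.map_replicate, Function.comp]

lemma pvPos_eq_map (k_gram : List String) (edges : List String) (m : Int) (datum : List String) :
    pvPos k_gram datum = (pvBlk k_gram edges m datum).map (fun t => t.2.1) := by
  simp [pvPos, pvBlk, List.map_replicate, Function.comp]

-- matched windows agree: condition and produced clause tuple coincide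
lemma pvWinA_nat (k_gram : List String) (data : List (List String)) (edges : List String) (o : Nat) :
    pvWinA k_gram data edges (o : Int) = ((pvF k_gram edges 0 data).drop o).take k_gram.length := by
  simp only [pvWinA, PySem.List.len_eq]
  exact PySem.List.slice_natCast_add _ o k_gram.length

lemma pv_agree (k_gram : List String) (data : List (List String)) (edges : List String)
    (hk : 1 ≤ k_gram.length) (j i o : Nat) (datum : List String)
    (hj : data[j]? = some datum)
    (hi : i + k_gram.length ≤ (pvBlk k_gram edges (j : Int) datum).length)
    (ho : o + k_gram.length ≤ (pvF k_gram edges 0 data).length)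
    (hw : ((pvF k_gram edges 0 data).drop o).take k_gram.length
        = ((pvBlk k_gram edges (j : Int) datum).drop i).take k_gram.length) :
    pvCondA k_gram data edges (o : Int) = pvCondB k_gram edges datum (i : Int) ∧
    pvTupA k_gram data edges (o : Int) = pvTupB k_gram edges datum (i : Int) := by
  have hwinA : pvWinA k_gram data edges (o : Int)
      = ((pvBlk k_gram edges (j : Int) datum).drop i).take k_gram.length := by
    rw [pvWinA_nat]
    exact hw
  set W := ((pvBlk k_gram edges (j : Int) datum).drop i).take k_gram.length with hWdef
  have hWlen : W.length = k_gram.length := by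
    simp only [hWdef, List.length_take, List.length_drop]
    omega
  have hWblk : ∀ x ∈ W, x ∈ pvBlk k_gram edges (j : Int) datum := by
    intro x hx
    exact List.mem_of_mem_drop (List.mem_of_mem_take hx)
  have hfst : ∀ x ∈ W, x.1 = (j : Int) := fun x hx => pv_fst_mem_pvBlk (hWblk x hx)
  have hWne : W ≠ [] := by
    apply List.ne_nil_of_length_pos
    omega
  have hM0 : PySem.List.pyGetD (W.map (fun t => t.1)) 0 0 = (j : Int) := by
    obtain ⟨x0, wt, hW0⟩ := List.exists_cons_of_ne_nil hWne
    rw [hW0, List.map_cons, PySem.List.pyGetD_zero_cons]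
    exact hfst x0 (by rw [hW0]; exact List.mem_cons_self ..)
  have hall : (W.map (fun t => t.1)).all
      (fun m => m == PySem.List.pyGetD (W.map (fun t => t.1)) 0 0) = true := by
    rw [List.all_eq_true]
    intro m hm
    rw [hM0]
    obtain ⟨x, hx, rfl⟩ := List.mem_map.1 hm
    exact beq_iff_eq.2 (hfst x hx)
  have hseg : PySem.List.slice (pvSegs k_gram edges datum) (some (i : Int))
      (some ((i : Int) + PySem.List.len k_gram)) = W.map (fun t => t.2.2) := by
    simp only [PySem.List.len_eq]
    rw [PySem.List.slice_natCast_add _ i k_gram.length]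
    rw [pvSegs_eq_map k_gram edges (j : Int) datum, hWdef]
    simp only [List.map_take, List.map_drop]
  have hpos : pvPos k_gram datum = (pvBlk k_gram edges (j : Int) datum).map (fun t => t.2.1) :=
    pvPos_eq_map k_gram edges (j : Int) datum
  have hposlen : i + k_gram.length ≤ (pvPos k_gram datum).length := by
    rw [hpos, List.length_map]
    exact hi
  have hN : W.map (fun t => t.2.1) = ((pvPos k_gram datum).drop i).take k_gram.length := by
    rw [hpos, hWdef]
    simp only [List.map_take, List.map_drop]
  have hnp1 : PySem.List.slice (W.map (fun t => t.2.1)) none (some (-1))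
      = ((pvPos k_gram datum).drop i).take (k_gram.length - 1) := by
    rw [PySem.List.slice_to_neg_one, hN]
    rcases lt_or_eq_of_le (show k_gram.length ≤ ((pvPos k_gram datum).drop i).length by
      simp only [List.length_drop]; omega) with h' | h'
    · exact List.dropLast_take h'
    · rw [h', List.take_length, List.dropLast_eq_take]
  have hnp2 : PySem.List.slice (W.map (fun t => t.2.1)) (some 1) none
      = ((pvPos k_gram datum).drop (i + 1)).take (k_gram.length - 1) := by
    rw [PySem.List.slice_from_one, hN, ← List.drop_one, List.drop_take, List.drop_drop]
  have hnpB1 : PySem.List.slice (pvPos k_gram datum) (some (i : Int))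
      (some ((i : Int) + PySem.List.len k_gram - 1))
      = ((pvPos k_gram datum).drop i).take (k_gram.length - 1) := by
    simp only [PySem.List.len_eq]
    rw [show ((i : Int) + (k_gram.length : Int) - 1) = ((i + (k_gram.length - 1) : Nat) : Int) by
      push_cast [hk]; omega]
    rw [PySem.List.slice_natCast]
    congr 1
    omega
  have hnpB2 : PySem.List.slice (pvPos k_gram datum) (some ((i : Int) + 1))
      (some ((i : Int) + PySem.List.len k_gram))
      = ((pvPos k_gram datum).drop (i + 1)).take (k_gram.length - 1) := by
    simp only [PySem.List.len_eq]
    rw [show ((i : Int) + 1) = ((i + 1 : Nat) : Int) by push_cast; ring,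
        show ((i : Int) + (k_gram.length : Int)) = (((i + 1) + (k_gram.length - 1) : Nat) : Int) by
          push_cast [hk]; omega]
    rw [PySem.List.slice_natCast]
    congr 1
    omega
  have hdatum : PySem.List.pyGetD data (j : Int) [] = datum := by
    rw [PySem.List.pyGetD_natCast, List.getD_eq_getElem?_getD, hj, Option.getD_some]
  constructor
  · simp only [pvCondA, pvCondB, hwinA, ← hWdef, hall, Bool.and_true, hseg]
  · simp only [pvTupA, pvTupB, hwinA, ← hWdef, hM0, hdatum, hnp1, hnp2, hnpB1, hnpB2]

-- membership characterisation of A's cnf via the window condition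
lemma pv_memA_char (k_gram : List String) (data : List (List String)) (edges : List String) (c : List String) :
    c ∈ pvCnfA k_gram data edges ↔
      ∃ off ∈ PySem.List.pyRange 0 (PySem.List.len (pvF k_gram edges 0 data) - PySem.List.len k_gram + 1) 1,
        pvCondA k_gram data edges off ∧ c = pvTupA k_gram data edges off := by
  unfold pvCnfA
  rw [pv_mem_foldl_condAdd]
  simp only [PySem.Set.empty, List.not_mem_nil, false_or]

lemma pv_memB_char (k_gram : List String) (data : List (List String)) (edges : List String) (c : List String) :
    c ∈ pvCnfB k_gram data edges ↔
      ∃ datum ∈ data,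
        ∃ i ∈ PySem.List.pyRange 0 (PySem.List.len (pvSegs k_gram edges datum) - PySem.List.len k_gram + 1) 1,
          pvCondB k_gram edges datum i ∧ c = pvTupB k_gram edges datum i := by
  unfold pvCnfB
  rw [pv_mem_foldl2]
  simp only [PySem.Set.empty, List.not_mem_nil, false_or]

-- the two window-based cnf sets have the same members
lemma pv_mem_iff (k_gram : List String) (data : List (List String)) (edges : List String)
    (hk : 1 ≤ k_gram.length) (c : List String) :
    c ∈ pvCnfA k_gram data edges ↔ c ∈ pvCnfB k_gram data edges := by
  rw [pv_memA_char, pv_memB_char]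
  constructor
  · rintro ⟨off, hoffmem, hcond, rfl⟩
    obtain ⟨hoff0, hoffub⟩ := PySem.List.mem_pyRange_one.1 hoffmem
    simp only [PySem.List.len_eq] at hoffub
    have hoff : off = ((off.toNat : Nat) : Int) := (Int.toNat_of_nonneg hoff0).symm
    have hoP : off.toNat + k_gram.length ≤ (pvF k_gram edges 0 data).length := by omega
    rw [hoff] at hcond ⊢
    obtain ⟨hsegc, hallc⟩ := Bool.and_eq_true_iff.1 hcond
    have hsame : ∀ x ∈ ((pvF k_gram edges 0 data).drop off.toNat).take k_gram.length,
        x.1 = PySem.List.pyGetD ((pvWinA k_gram data edges (off.toNat : Int)).map (fun t => t.1)) 0 0 := by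
      intro x hx
      have hx' : x.1 ∈ (pvWinA k_gram data edges (off.toNat : Int)).map (fun t => t.1) := by
        rw [pvWinA_nat]
        exact List.mem_map_of_mem hx
      exact beq_iff_eq.1 (List.all_eq_true.1 hallc _ hx')
    obtain ⟨j, datum, i, hj, hbound, heq⟩ :=
      pv_split k_gram edges hk data 0 off.toNat _ hoP hsame
    simp only [zero_add] at hbound heq
    obtain ⟨hcondEq, htupEq⟩ := pv_agree k_gram data edges hk j i off.toNat datum hj hbound hoP heq
    refine ⟨datum, List.mem_of_getElem? hj, (i : Int), ?_, ?_, ?_⟩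
    · rw [PySem.List.mem_pyRange_one]
      have hlseg : (pvSegs k_gram edges datum).length = (pvBlk k_gram edges (j : Int) datum).length := by
        rw [pvSegs_eq_map k_gram edges (j : Int) datum, List.length_map]
      simp only [PySem.List.len_eq, hlseg]
      omega
    · rw [← hcondEq]
      exact hcond
    · rw [htupEq]
  · rintro ⟨datum, hdmem, i, himem, hcond, rfl⟩
    obtain ⟨j, hj⟩ := List.mem_iff_getElem?.1 hdmem
    have hlseg : (pvSegs k_gram edges datum).length = (pvBlk k_gram edges (j : Int) datum).length := by
      rw [pvSegs_eq_map k_gram edges (j : Int) datum, List.length_map]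
    obtain ⟨hi0, hiub⟩ := PySem.List.mem_pyRange_one.1 himem
    simp only [PySem.List.len_eq, hlseg] at hiub
    have hii : i = ((i.toNat : Nat) : Int) := (Int.toNat_of_nonneg hi0).symm
    have hbound : i.toNat + k_gram.length ≤ (pvBlk k_gram edges (j : Int) datum).length := by omega
    obtain ⟨o, ho, heq⟩ := pv_compose k_gram edges data 0 j i.toNat datum hj (by simpa using hbound)
    simp only [zero_add] at heq
    obtain ⟨hcondEq, htupEq⟩ := pv_agree k_gram data edges hk j i.toNat o datum hj hbound ho heq
    rw [hii] at hcond ⊢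
    refine ⟨(o : Int), ?_, ?_, ?_⟩
    · rw [PySem.List.mem_pyRange_one]
      simp only [PySem.List.len_eq]
      omega
    · rw [hcondEq]
      exact hcond
    · rw [htupEq]

-- ===================== KMP correctness =====================

lemma pv_suffix_of_suffix_le {α : Type} {s s' t : List α} (h : s <:+ t) (h' : s' <:+ t)
    (hl : s.length ≤ s'.length) : s <:+ s' := by
  have := List.prefix_of_prefix_length_le (List.reverse_prefix.mpr h) (List.reverse_prefix.mpr h')
    (by simpa)
  exact List.reverse_prefix.mp this

lemma pv_snoc_suffix_snoc {α : Type} (X Y : List α) (a c : α) :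
    X ++ [a] <:+ Y ++ [c] ↔ a = c ∧ X <:+ Y := by
  rw [← List.reverse_prefix]
  simp only [List.reverse_append, List.reverse_cons, List.reverse_nil, List.nil_append,
    List.cons_append]
  rw [List.cons_prefix_cons, List.reverse_prefix]

lemma pv_take_snoc (p : List String) (l : Nat) (hl : l < p.length) :
    p.take (l + 1) = p.take l ++ [p.getD l ""] := by
  rw [List.take_succ, List.getElem?_eq_getElem hl, List.getD_eq_getElem?_getD,
    List.getElem?_eq_getElem hl]
  rfl

lemma pv_border_pop (p t : List String) (c : String) (l : Nat) (hl : l + 1 ≤ p.length) :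
    p.take (l + 1) <:+ t ++ [c] ↔ p.getD l "" = c ∧ p.take l <:+ t := by
  rw [pv_take_snoc p l (by omega), pv_snoc_suffix_snoc]

lemma pvShrink_fuel (p : List String) (F : List Nat) (c : String)
    (hdec : ∀ i, F.getD i 0 ≤ i) :
    ∀ q f, q ≤ f → pvShrink p F c f q = pvShrink p F c q q := by
  intro q
  induction q using Nat.strong_induction_on with
  | _ q ih =>
    intro f hf
    match q, hf with
    | 0, _ =>
      match f with
      | 0 => rfl
      | f + 1 => simp [pvShrink]
    | q0 + 1, hf =>
      match f, hf with
      | f0 + 1, hf =>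
        show pvShrink p F c (f0 + 1) (q0 + 1) = pvShrink p F c (q0 + 1) (q0 + 1)
        rw [pvShrink, pvShrink]
        by_cases hcond : ((q0 + 1 : Nat) != 0 && !(c == PySem.List.pyGetD p ((q0 + 1 : Nat) : Int) "")) = true
        · rw [if_pos hcond, if_pos hcond]
          have hq' : F.getD (q0 + 1 - 1) 0 ≤ q0 := by
            have := hdec (q0 + 1 - 1)
            omega
          rw [ih (F.getD (q0 + 1 - 1) 0) (by omega) f0 (by omega),
              ih (F.getD (q0 + 1 - 1) 0) (by omega) q0 (by omega)]
        · rw [if_neg hcond, if_neg hcond]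

lemma pvStep_max (p : List String) (F : List Nat) (c : String) (t : List String) (b : Nat)
    (hb : b + 1 ≤ p.length) (hdec : ∀ i, F.getD i 0 ≤ i) :
    ∀ q, (∀ j, j < q → pvMaxB p (p.take (j + 1)) j (F.getD j 0)) →
      p.take q <:+ t → q ≤ b →
      (∀ l, l ≤ b + 1 → p.take l <:+ t ++ [c] → l ≤ q + 1) →
      pvMaxB p (t ++ [c]) (b + 1) (pvStep p F c q) := by
  intro q
  induction q using Nat.strong_induction_on with
  | _ q ih =>
    intro hFb htake hqb hmax
    match q, hFb, htake, hqb, hmax with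
    | 0, hFb, htake, hqb, hmax =>
      by_cases heq : (c == PySem.List.pyGetD p ((0 : Nat) : Int) "") = true
      · have hres : pvStep p F c 0 = 1 := by
          unfold pvStep
          show (if c == PySem.List.pyGetD p ((pvShrink p F c 0 0 : Nat) : Int) "" then _ else _) = 1
          rw [show pvShrink p F c 0 0 = 0 from rfl, if_pos heq]
        rw [hres]
        refine ⟨by omega, ?_, fun l hl hsuf => hmax l hl hsuf⟩
        refine (pv_border_pop p t c 0 (by omega)).mpr ⟨?_, by simp⟩
        have := beq_iff_eq.mp heq
        rw [PySem.List.pyGetD_natCast] at this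
        exact this.symm
      · have hres : pvStep p F c 0 = 0 := by
          unfold pvStep
          show (if c == PySem.List.pyGetD p ((pvShrink p F c 0 0 : Nat) : Int) "" then _ else _) = 0
          rw [show pvShrink p F c 0 0 = 0 from rfl, if_neg heq]
        rw [hres]
        refine ⟨by omega, by simp, ?_⟩
        intro l hl hsuf
        have hl1 : l ≤ 1 := hmax l hl hsuf
        match l, hl1, hsuf with
        | 0, _, _ => exact le_refl 0
        | 1, _, hsuf =>
          exfalso
          have := ((pv_border_pop p t c 0 (by omega)).mp hsuf).1
          exact heq (by rw [PySem.List.pyGetD_natCast]; exact beq_iff_eq.mpr this.symm)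
    | q0 + 1, hFb, htake, hqb, hmax =>
      by_cases hcb : (c == PySem.List.pyGetD p (((q0 + 1 : Nat)) : Int) "") = true
      · -- pattern extends: shrink is the identity, result q0 + 2
        have hsh : pvShrink p F c (q0 + 1) (q0 + 1) = q0 + 1 := by
          rw [pvShrink, hcb]
          simp
        have hres : pvStep p F c (q0 + 1) = q0 + 2 := by
          unfold pvStep
          show (if c == PySem.List.pyGetD p ((pvShrink p F c (q0+1) (q0+1) : Nat) : Int) "" then _ else _) = _
          rw [hsh, if_pos hcb]
        rw [hres]
        refine ⟨by omega, ?_, fun l hl hsuf => hmax l hl hsuf⟩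
        refine (pv_border_pop p t c (q0 + 1) (by omega)).mpr ⟨?_, htake⟩
        have := beq_iff_eq.mp hcb
        rw [PySem.List.pyGetD_natCast] at this
        exact this.symm
      · -- mismatch: fall back through the failure table
        have hcbf : (c == PySem.List.pyGetD p (((q0 + 1 : Nat)) : Int) "") = false :=
          Bool.of_not_eq_true hcb
        have hcond : ((q0 + 1 : Nat) != 0 && !(c == PySem.List.pyGetD p (((q0 + 1 : Nat)) : Int) "")) = true := by
          rw [hcbf]
          simp
        have hq' : F.getD q0 0 ≤ q0 := hdec q0
        have hsh : pvShrink p F c (q0 + 1) (q0 + 1)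
            = pvShrink p F c (F.getD q0 0) (F.getD q0 0) := by
          rw [pvShrink, if_pos hcond]
          show pvShrink p F c q0 (F.getD (q0 + 1 - 1) 0) = _
          rw [show q0 + 1 - 1 = q0 from rfl]
          exact pvShrink_fuel p F c hdec (F.getD q0 0) q0 hq'
        have hstep : pvStep p F c (q0 + 1) = pvStep p F c (F.getD q0 0) := by
          unfold pvStep
          rw [hsh]
        rw [hstep]
        have hFq0 := hFb q0 (by omega)
        refine ih (F.getD q0 0) (by omega) (fun j hj => hFb j (by omega))
          (hFq0.2.1.trans htake) (by omega) ?_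
        intro l hl hsuf
        have hlq := hmax l hl hsuf
        match l, hl, hsuf, hlq with
        | 0, _, _, _ => omega
        | l0 + 1, hl, hsuf, hlq =>
          obtain ⟨hgd, hsufl0⟩ := (pv_border_pop p t c l0 (by omega)).mp hsuf
          have hne : l0 ≠ q0 + 1 := by
            intro h
            subst h
            exact hcb (by rw [PySem.List.pyGetD_natCast]; exact beq_iff_eq.mpr hgd.symm)
          have hlle : l0 ≤ q0 := by omega
          have hsub : p.take l0 <:+ p.take (q0 + 1) :=
            pv_suffix_of_suffix_le hsufl0 htake
              (by simp only [List.length_take]; omega)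
          have := hFq0.2.2 l0 hlle hsub
          omega

lemma pvStep_top (p : List String) (F : List Nat) (c : String) (t : List String) (b q : Nat)
    (hb : b + 1 ≤ p.length) (hdec : ∀ i, F.getD i 0 ≤ i)
    (hFb : ∀ j, j < q → pvMaxB p (p.take (j + 1)) j (F.getD j 0))
    (htop : pvMaxB p t b q) :
    pvMaxB p (t ++ [c]) (b + 1) (pvStep p F c q) := by
  refine pvStep_max p F c t b hb hdec q hFb htop.2.1 htop.1 ?_
  intro l hl hsuf
  match l, hl, hsuf with
  | 0, _, _ => omega
  | l0 + 1, hl, hsuf =>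
    obtain ⟨-, hsufl0⟩ := (pv_border_pop p t c l0 (by omega)).mp hsuf
    have := htop.2.2 l0 (by omega) hsufl0
    omega

lemma pv_matched (p t' : List String) (q2 : Nat) (hp : p ≠ [])
    (h : pvMaxB p t' p.length q2) : q2 = p.length ↔ p <:+ t' := by
  constructor
  · intro he
    have := h.2.1
    rw [he, List.take_length] at this
    exact this
  · intro hs
    have h1 := h.2.2 p.length (le_refl _) (by rw [List.take_length]; exact hs)
    have := h.1
    omega

lemma pv_reset (p t' : List String) (F : List Nat) (q2 : Nat) (hp : p ≠ [])
    (h : pvMaxB p t' p.length q2)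
    (hFk : pvMaxB p p (p.length - 1) (F.getD (p.length - 1) 0)) :
    pvMaxB p t' (p.length - 1) (if q2 = p.length then F.getD (p.length - 1) 0 else q2) := by
  have hplen : 1 ≤ p.length := List.length_pos_iff.mpr hp
  by_cases he : q2 = p.length
  · rw [if_pos he]
    have hsufp : p <:+ t' := (pv_matched p t' q2 hp h).mp he
    refine ⟨hFk.1, hFk.2.1.trans hsufp, ?_⟩
    intro l hl hsuf
    have hsub : p.take l <:+ p :=
      pv_suffix_of_suffix_le hsuf hsufp (by simp only [List.length_take]; omega)
    exact hFk.2.2 l hl hsub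
  · rw [if_neg he]
    have hq2 : q2 ≤ p.length - 1 := by have := h.1; omega
    exact ⟨hq2, h.2.1, fun l hl hsuf => h.2.2 l (by omega) hsuf⟩

lemma pvMaxB_nil (p : List String) (hp : p ≠ []) : pvMaxB p [] (p.length - 1) 0 := by
  have hplen : 1 ≤ p.length := List.length_pos_iff.mpr hp
  refine ⟨by omega, by simp, ?_⟩
  intro l hl hsuf
  have := List.suffix_nil.mp hsuf
  have hlen : (p.take l).length = 0 := by rw [this]; rfl
  simp only [List.length_take] at hlen
  omega

def pvFailInv (p : List String) (st : List Nat × Nat) (i : Nat) : Prop :=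
  st.1.length = p.length ∧ st.2 = st.1.getD (i - 1) 0 ∧
  (∀ j, j < i → pvMaxB p (p.take (j + 1)) j (st.1.getD j 0)) ∧
  (∀ j, i ≤ j → st.1.getD j 0 = 0)

lemma pv_getD_replicate (n j : Nat) : (List.replicate n (0 : Nat)).getD j 0 = 0 := by
  rw [List.getD_eq_getElem?_getD, List.getElem?_replicate]
  split <;> rfl

lemma pvFail_build (p : List String) :
    ∀ i : Nat, 1 ≤ i → i ≤ p.length →
      pvFailInv p ((PySem.List.pyRange 1 (i : Int) 1).foldl
        (fun (st : List Nat × Nat) i =>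
          let c := PySem.List.pyGetD p i ""
          let q1 := pvShrink p st.1 c st.2 st.2
          let q2 := if c == PySem.List.pyGetD p (q1 : Int) "" then q1 + 1 else q1
          (st.1.set i.toNat q2, q2))
        (List.replicate p.length 0, 0)) i := by
  intro i
  induction i with
  | zero => omega
  | succ i ih =>
    intro h1 hle
    by_cases hi1 : i = 0
    · -- base case i + 1 = 1: empty range
      subst hi1
      rw [show ((1 : Nat) : Int) = 1 from rfl, PySem.List.pyRange_one_eq_nil (by omega)]
      simp only [List.foldl_nil]
      refine ⟨by simp, (pv_getD_replicate _ _).symm, ?_, fun j _ => pv_getD_replicate _ _⟩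
      intro j hj
      rw [pv_getD_replicate]
      have : j = 0 := by omega
      subst this
      exact ⟨le_refl 0, by simp, fun l hl _ => by omega⟩
    · -- inductive step: peel the last range element i
      have hi : 1 ≤ i := by omega
      have hrange : PySem.List.pyRange 1 ((i + 1 : Nat) : Int) 1
          = PySem.List.pyRange 1 (i : Int) 1 ++ [(i : Int)] := by
        rw [show ((i + 1 : Nat) : Int) = (i : Int) + 1 by push_cast; ring]
        exact PySem.List.pyRange_one_succ_right (by exact_mod_cast hi)
      rw [hrange, List.foldl_append]
      obtain ⟨hlen, hq, hcorr, hzero⟩ := ih hi (by omega)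
      set st := (PySem.List.pyRange 1 (i : Int) 1).foldl
        (fun (st : List Nat × Nat) i =>
          let c := PySem.List.pyGetD p i ""
          let q1 := pvShrink p st.1 c st.2 st.2
          let q2 := if c == PySem.List.pyGetD p (q1 : Int) "" then q1 + 1 else q1
          (st.1.set i.toNat q2, q2))
        (List.replicate p.length 0, 0) with hst
      simp only [List.foldl_cons, List.foldl_nil]
      have hdec : ∀ j, st.1.getD j 0 ≤ j := by
        intro j
        by_cases hj : j < i
        · exact (hcorr j hj).1
        · rw [hzero j (by omega)]
          exact Nat.zero_le j
      have hc : PySem.List.pyGetD p ((i : Nat) : Int) "" = p.getD i "" :=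
        PySem.List.pyGetD_natCast p i ""
      have htop : pvMaxB p (p.take i) (i - 1) st.2 := by
        rw [hq]
        have := hcorr (i - 1) (by omega)
        rwa [show i - 1 + 1 = i by omega] at this
      have hstep : pvMaxB p (p.take i ++ [p.getD i ""]) i
          (pvStep p st.1 (p.getD i "") st.2) := by
        have := pvStep_top p st.1 (p.getD i "") (p.take i) (i - 1) st.2
          (by omega) hdec
          (fun j hj => hcorr j (by have h2 := hdec (i - 1); rw [hq] at hj; omega)) htop
        rwa [show i - 1 + 1 = i by omega] at this
      rw [← pv_take_snoc p i (by omega)] at hstep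
      simp only [hc, Int.toNat_natCast]
      show pvFailInv p (st.1.set i (pvStep p st.1 (p.getD i "") st.2),
        pvStep p st.1 (p.getD i "") st.2) (i + 1)
      set q2 := pvStep p st.1 (p.getD i "") st.2 with hq2
      have hilen : i < st.1.length := by omega
      have hgset_self : (st.1.set i q2).getD i 0 = q2 := by
        rw [List.getD_eq_getElem?_getD, List.getElem?_set_self (by omega)]
        rfl
      have hgset_ne : ∀ j, j ≠ i → (st.1.set i q2).getD j 0 = st.1.getD j 0 := by
        intro j hj
        rw [List.getD_eq_getElem?_getD, List.getElem?_set_ne (by omega),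
          ← List.getD_eq_getElem?_getD]
      refine ⟨by simp [hlen], hgset_self.symm, ?_, ?_⟩
      · intro j hj
        by_cases hji : j = i
        · subst hji
          rw [hgset_self]
          exact hstep
        · rw [hgset_ne j hji]
          exact hcorr j (by omega)
      · intro j hj
        rw [hgset_ne j (by omega)]
        exact hzero j (by omega)

lemma pvFail_corr (p : List String) (hp : p ≠ []) :
    (pvFail p).length = p.length ∧
    (∀ j, j < p.length → pvMaxB p (p.take (j + 1)) j ((pvFail p).getD j 0)) ∧
    (∀ j, p.length ≤ j → (pvFail p).getD j 0 = 0) := by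
  have h := pvFail_build p p.length (List.length_pos_iff.mpr hp) (le_refl _)
  have he : pvFail p = ((PySem.List.pyRange 1 ((p.length : Nat) : Int) 1).foldl
        (fun (st : List Nat × Nat) i =>
          let c := PySem.List.pyGetD p i ""
          let q1 := pvShrink p st.1 c st.2 st.2
          let q2 := if c == PySem.List.pyGetD p (q1 : Int) "" then q1 + 1 else q1
          (st.1.set i.toNat q2, q2))
        (List.replicate p.length 0, 0)).1 := rfl
  rw [he]
  exact ⟨h.1, h.2.2.1, h.2.2.2⟩

lemma pvFail_dec (p : List String) (hp : p ≠ []) : ∀ i, (pvFail p).getD i 0 ≤ i := by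
  intro i
  obtain ⟨-, hcorr, hzero⟩ := pvFail_corr p hp
  by_cases hi : i < p.length
  · exact (hcorr i hi).1
  · rw [hzero i (by omega)]
    exact Nat.zero_le i

lemma pvFail_topk (p : List String) (hp : p ≠ []) :
    pvMaxB p p (p.length - 1) ((pvFail p).getD (p.length - 1) 0) := by
  obtain ⟨-, hcorr, -⟩ := pvFail_corr p hp
  have hplen : 1 ≤ p.length := List.length_pos_iff.mpr hp
  have := hcorr (p.length - 1) (by omega)
  rwa [show p.length - 1 + 1 = p.length by omega, List.take_length] at this

lemma pv_scan_mem (p : List String) (datum : List String) (pos : List Int) (hp : p ≠ []) :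
    ∀ (ts t : List String) (q : Nat) (cnf : PySem.Set (List String)),
      pvMaxB p t (p.length - 1) q →
      ∀ y, (y ∈ ((PySem.List.enumerate ts (t.length : Int)).foldl
              (pvScanStep p (pvFail p) p.length datum pos) (q, cnf)).2 ↔
        (y ∈ cnf ∨ ∃ j : Nat, t.length ≤ j ∧ j < t.length + ts.length ∧
            p <:+ ((t ++ ts).take (j + 1)) ∧ y = pvTupK datum pos p.length (j : Int))) := by
  have hplen : 1 ≤ p.length := List.length_pos_iff.mpr hp
  have hdec := pvFail_dec p hp
  have hFk := pvFail_topk p hp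
  obtain ⟨-, hcorr, -⟩ := pvFail_corr p hp
  intro ts
  induction ts with
  | nil =>
    intro t q cnf htop y
    simp only [PySem.List.enumerate_nil, List.foldl_nil, List.length_nil, Nat.add_zero]
    constructor
    · exact fun h => Or.inl h
    · rintro (h | ⟨j, hj1, hj2, -, -⟩)
      · exact h
      · omega
  | cons c ts' ih =>
    intro t q cnf htop y
    rw [PySem.List.enumerate_cons, List.foldl_cons]
    set q2 := pvStep p (pvFail p) c q with hq2def
    have hq2max : pvMaxB p (t ++ [c]) p.length q2 := by
      have := pvStep_top p (pvFail p) c t (p.length - 1) q (by omega) hdec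
        (fun j hj => hcorr j (by have := htop.1; omega)) htop
      rwa [show p.length - 1 + 1 = p.length by omega] at this
    have hmatch := pv_matched p (t ++ [c]) q2 hp hq2max
    have hreset := pv_reset p (t ++ [c]) (pvFail p) q2 hp hq2max hFk
    have happ : t ++ c :: ts' = (t ++ [c]) ++ ts' := by simp
    have htake1 : ((t ++ [c]) ++ ts').take (t.length + 1) = t ++ [c] := by
      rw [List.take_left' (by simp)]
    by_cases hm : q2 = p.length
    · have hstep : pvScanStep p (pvFail p) p.length datum pos (q, cnf) ((t.length : Int), c)
          = ((pvFail p).getD (p.length - 1) 0,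
             PySem.Set.add cnf (pvTupK datum pos p.length (t.length : Int))) := by
        show (if q2 == p.length then _ else _) = _
        rw [if_pos (beq_iff_eq.mpr hm)]
      rw [hstep]
      rw [if_pos hm] at hreset
      have ihx := ih (t ++ [c]) ((pvFail p).getD (p.length - 1) 0)
        (PySem.Set.add cnf (pvTupK datum pos p.length (t.length : Int))) hreset y
      rw [show (((t ++ [c]).length : Nat) : Int) = (t.length : Int) + 1 by push_cast; simp]
        at ihx
      rw [ihx]
      rw [PySem.Set.mem_add]
      have hsuf1 : p <:+ (t ++ c :: ts').take (t.length + 1) := by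
        rw [happ, htake1]
        exact hmatch.mp hm
      constructor
      · rintro ((hy | rfl) | ⟨j, hj1, hj2, hsuf, rfl⟩)
        · exact Or.inl hy
        · exact Or.inr ⟨t.length, le_refl _, by simp, hsuf1, rfl⟩
        · refine Or.inr ⟨j, by simp at hj1 ⊢; omega, by simp at hj2 ⊢; omega, ?_, rfl⟩
          rw [happ]
          exact hsuf
      · rintro (hy | ⟨j, hj1, hj2, hsuf, rfl⟩)
        · exact Or.inl (Or.inl hy)
        · by_cases hje : j = t.length
          · subst hje
            exact Or.inl (Or.inr rfl)
          · refine Or.inr ⟨j, by simp; omega, by simp at hj2 ⊢; omega, ?_, rfl⟩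
            rw [← happ]
            exact hsuf
    · have hstep : pvScanStep p (pvFail p) p.length datum pos (q, cnf) ((t.length : Int), c)
          = (q2, cnf) := by
        show (if q2 == p.length then _ else _) = _
        rw [if_neg (by simp [hm])]
        rfl
      rw [hstep]
      rw [if_neg hm] at hreset
      have ihx := ih (t ++ [c]) q2 cnf hreset y
      rw [show (((t ++ [c]).length : Nat) : Int) = (t.length : Int) + 1 by push_cast; simp]
        at ihx
      rw [ihx]
      constructor
      · rintro (hy | ⟨j, hj1, hj2, hsuf, rfl⟩)
        · exact Or.inl hy
        · refine Or.inr ⟨j, by simp at hj1 ⊢; omega, by simp at hj2 ⊢; omega, ?_, rfl⟩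
          rw [happ]
          exact hsuf
      · rintro (hy | ⟨j, hj1, hj2, hsuf, rfl⟩)
        · exact Or.inl hy
        · by_cases hje : j = t.length
          · exfalso
            subst hje
            rw [happ, htake1] at hsuf
            exact hm (hmatch.mpr hsuf)
          · refine Or.inr ⟨j, by simp; omega, by simp at hj2 ⊢; omega, ?_, rfl⟩
            rw [← happ]
            exact hsuf

lemma pv_scan_nodup (p : List String) (F : List Nat) (k : Nat) (datum : List String) (pos : List Int) :
    ∀ (l : List (Int × String)) (st : Nat × PySem.Set (List String)), List.Nodup st.2 →
      List.Nodup ((l.foldl (pvScanStep p F k datum pos) st).2) := by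
  intro l
  induction l with
  | nil => intro st h; simpa using h
  | cons jt l ih =>
    intro st h
    rw [List.foldl_cons]
    refine ih _ ?_
    simp only [pvScanStep]
    split
    · split
      · exact PySem.Set.nodup_add _ _ h
      · exact h
    · split
      · exact PySem.Set.nodup_add _ _ h
      · exact h

lemma pv_zip_take_left {α β : Type} :
    ∀ (l : List α) (l' : List β), List.zip l l' = List.zip (l.take l'.length) l' := by
  intro l
  induction l with
  | nil => intro l'; simp
  | cons a l ih =>
    intro l'
    cases l' with
    | nil => simp
    | cons b l' => simp [List.zip_cons_cons, ih l']

lemma pv_len_pos_segs (k_gram edges datum : List String) :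
    (pvPos k_gram datum).length = (pvSegs k_gram edges datum).length := by
  simp [pvPos, pvSegs]

lemma pv_tup_eq (k_gram edges datum : List String) (hk : 1 ≤ k_gram.length) (i0 : Nat)
    (hik : i0 + k_gram.length ≤ (pvSegs k_gram edges datum).length) :
    pvTupK datum (pvPos k_gram datum) k_gram.length ((i0 + k_gram.length - 1 : Nat) : Int)
      = pvTupB k_gram edges datum (i0 : Int) := by
  set k := k_gram.length with hkdef
  set pos := pvPos k_gram datum with hposdef
  have hpos : i0 + k ≤ pos.length := by
    rw [hposdef, pv_len_pos_segs k_gram edges datum]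
    exact hik
  have hj1 : ((i0 + k - 1 : Nat) : Int) - (k : Int) + 1 = ((i0 : Nat) : Int) := by omega
  have hj2 : ((i0 + k - 1 : Nat) : Int) + 1 = ((i0 + k : Nat) : Int) := by omega
  have hps : PySem.List.slice pos (some (((i0 + k - 1 : Nat) : Int) - (k : Int) + 1))
      (some (((i0 + k - 1 : Nat) : Int) + 1)) = (pos.drop i0).take k := by
    rw [hj1, hj2, PySem.List.slice_natCast]
    congr 1
    omega
  have hlps : ((pos.drop i0).take k).length = k := by
    simp only [List.length_take, List.length_drop]
    omega
  have htail : PySem.List.slice ((pos.drop i0).take k) (some 1) none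
      = (pos.drop (i0 + 1)).take (k - 1) := by
    rw [PySem.List.slice_from_one, ← List.drop_one, List.drop_take, List.drop_drop]
  have hYlen : ((pos.drop (i0 + 1)).take (k - 1)).length = k - 1 := by
    simp only [List.length_take, List.length_drop]
    omega
  have hXtake : ((pos.drop i0).take k).take (k - 1) = (pos.drop i0).take (k - 1) := by
    rw [List.take_take]
    congr 1
    omega
  have hzip : List.zip ((pos.drop i0).take k) ((pos.drop (i0 + 1)).take (k - 1))
      = List.zip ((pos.drop i0).take (k - 1)) ((pos.drop (i0 + 1)).take (k - 1)) := by
    rw [pv_zip_take_left ((pos.drop i0).take k) ((pos.drop (i0 + 1)).take (k - 1)), hYlen, hXtake]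
  have hB1 : PySem.List.slice pos (some ((i0 : Nat) : Int))
      (some (((i0 : Nat) : Int) + PySem.List.len k_gram - 1)) = (pos.drop i0).take (k - 1) := by
    simp only [PySem.List.len_eq, ← hkdef]
    rw [show ((i0 : Nat) : Int) + (k : Int) - 1 = ((i0 + (k - 1) : Nat) : Int) by omega,
      PySem.List.slice_natCast]
    congr 1
    omega
  have hB2 : PySem.List.slice pos (some (((i0 : Nat) : Int) + 1))
      (some (((i0 : Nat) : Int) + PySem.List.len k_gram)) = (pos.drop (i0 + 1)).take (k - 1) := by
    simp only [PySem.List.len_eq, ← hkdef]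
    rw [show ((i0 : Nat) : Int) + 1 = ((i0 + 1 : Nat) : Int) by omega,
      show ((i0 : Nat) : Int) + (k : Int) = (((i0 + 1) + (k - 1) : Nat) : Int) by omega,
      PySem.List.slice_natCast]
    congr 1
    omega
  show pvTup datum _ = pvTup datum _
  rw [hps, htail, hzip, hB1, hB2]

lemma pv_bridge (k_gram edges : List String) (datum : List String) (hk : 1 ≤ k_gram.length) (y : List String) :
    (∃ j : Nat, j < (pvSegs k_gram edges datum).length ∧
        k_gram <:+ ((pvSegs k_gram edges datum).take (j + 1)) ∧
        y = pvTupK datum (pvPos k_gram datum) k_gram.length (j : Int)) ↔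
    (∃ i ∈ PySem.List.pyRange 0 (PySem.List.len (pvSegs k_gram edges datum) - PySem.List.len k_gram + 1) 1,
        pvCondB k_gram edges datum i ∧ y = pvTupB k_gram edges datum i) := by
  set segs := pvSegs k_gram edges datum with hsegsdef
  set k := k_gram.length with hkdef
  constructor
  · rintro ⟨j, hj, hsuf, rfl⟩
    have hkj : k ≤ j + 1 := by
      have h1 := hsuf.length_le
      simp only [List.length_take] at h1
      omega
    set i0 := j + 1 - k with hi0def
    have hwin : (segs.drop i0).take k = k_gram := by
      have hw := (List.suffix_iff_eq_drop).mp hsuf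
      rw [List.length_take] at hw
      rw [show min (j + 1) segs.length - k = i0 by omega] at hw
      rw [hw, List.drop_take]
      congr 1
      omega
    refine ⟨(i0 : Int), ?_, ?_, ?_⟩
    · rw [PySem.List.mem_pyRange_one]
      simp only [PySem.List.len_eq, ← hkdef, ← hsegsdef]
      omega
    · rw [pvCondB]
      simp only [PySem.List.len_eq, ← hkdef, ← hsegsdef]
      rw [show ((i0 : Nat) : Int) + (k : Int) = ((i0 + k : Nat) : Int) by omega,
        PySem.List.slice_natCast, show i0 + k - i0 = k by omega, hwin]
      simp
    · rw [show ((j : Nat) : Int) = ((i0 + k - 1 : Nat) : Int) by omega]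
      exact pv_tup_eq k_gram edges datum hk i0 (by rw [← hsegsdef]; omega)
  · rintro ⟨i, hmem, hcond, rfl⟩
    rw [PySem.List.mem_pyRange_one] at hmem
    simp only [PySem.List.len_eq, ← hkdef, ← hsegsdef] at hmem
    set i0 := i.toNat with hi0def
    have hi : i = ((i0 : Nat) : Int) := by omega
    have hik : i0 + k ≤ segs.length := by omega
    have hwin : (segs.drop i0).take k = k_gram := by
      have hc := hcond
      rw [pvCondB] at hc
      simp only [PySem.List.len_eq, ← hkdef, ← hsegsdef] at hc
      rw [hi, show ((i0 : Nat) : Int) + (k : Int) = ((i0 + k : Nat) : Int) by omega,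
        PySem.List.slice_natCast, show i0 + k - i0 = k by omega] at hc
      exact beq_iff_eq.mp hc
    refine ⟨i0 + k - 1, by omega, ?_, ?_⟩
    · rw [show i0 + k - 1 + 1 = i0 + k by omega, List.take_add, ← hwin]
      exact List.suffix_append _ _
    · rw [hi]
      exact (pv_tup_eq k_gram edges datum hk i0 (by rw [← hsegsdef]; omega)).symm


-- membership and nodup of the KMP cnf
lemma pv_memK_char (k_gram : List String) (data : List (List String)) (edges : List String)
    (hk : 1 ≤ k_gram.length) (y : List String) :
    y ∈ pvCnfK k_gram data edges ↔
      ∃ datum ∈ data, ∃ j : Nat, j < (pvSegs k_gram edges datum).length ∧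
        k_gram <:+ ((pvSegs k_gram edges datum).take (j + 1)) ∧
        y = pvTupK datum (pvPos k_gram datum) k_gram.length (j : Int) := by
  have hp : k_gram ≠ [] := by
    intro h
    rw [h] at hk
    simp at hk
  suffices h : ∀ (ds : List (List String)) (cnf : PySem.Set (List String)),
      (y ∈ ds.foldl (fun cnf datum => ((PySem.List.enumerate (pvSegs k_gram edges datum)).foldl
          (pvScanStep k_gram (pvFail k_gram) k_gram.length datum (pvPos k_gram datum)) (0, cnf)).2) cnf ↔
        y ∈ cnf ∨ ∃ datum ∈ ds, ∃ j : Nat, j < (pvSegs k_gram edges datum).length ∧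
          k_gram <:+ ((pvSegs k_gram edges datum).take (j + 1)) ∧
          y = pvTupK datum (pvPos k_gram datum) k_gram.length (j : Int)) by
    have := h data PySem.Set.empty
    rw [pvCnfK, this]
    simp [PySem.Set.empty]
  intro ds
  induction ds with
  | nil => intro cnf; simp
  | cons d tl ih =>
    intro cnf
    rw [List.foldl_cons, ih]
    have hinner := pv_scan_mem k_gram d (pvPos k_gram d) hp (pvSegs k_gram edges d) [] 0 cnf
      (pvMaxB_nil k_gram hp) y
    simp only [List.length_nil, List.nil_append, Nat.zero_le, Nat.zero_add, Nat.cast_zero,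
      true_and] at hinner
    rw [hinner]
    constructor
    · rintro ((hy | ⟨j, hj1, hj2, rfl⟩) | ⟨d', hd', rest⟩)
      · exact Or.inl hy
      · exact Or.inr ⟨d, List.mem_cons_self .., j, hj1, hj2, rfl⟩
      · exact Or.inr ⟨d', List.mem_cons_of_mem _ hd', rest⟩
    · rintro (hy | ⟨d', hd', rest⟩)
      · exact Or.inl (Or.inl hy)
      · rcases List.mem_cons.1 hd' with rfl | hd'
        · exact Or.inl (Or.inr rest)
        · exact Or.inr ⟨d', hd', rest⟩

lemma pv_nodup_K (k_gram : List String) (data : List (List String)) (edges : List String) :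
    List.Nodup (pvCnfK k_gram data edges) := by
  rw [pvCnfK]
  suffices h : ∀ (ds : List (List String)) (cnf : PySem.Set (List String)), List.Nodup cnf →
      List.Nodup (ds.foldl (fun cnf datum => ((PySem.List.enumerate (pvSegs k_gram edges datum)).foldl
        (pvScanStep k_gram (pvFail k_gram) k_gram.length datum (pvPos k_gram datum)) (0, cnf)).2) cnf) by
    exact h data PySem.Set.empty List.nodup_nil
  intro ds
  induction ds with
  | nil => intro cnf h; simpa using h
  | cons d tl ih =>
    intro cnf h
    rw [List.foldl_cons]
    exact ih _ (pv_scan_nodup k_gram (pvFail k_gram) k_gram.length d (pvPos k_gram d) _ (0, cnf) h)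

-- ===== VERDICT (by name: the statement is the Claim_ definition above) =====
theorem map_k_gram_to_blockers_spec : Claim_equal_map_k_gram_to_blockers := by
  intro k_gram data edges _ hpre
  unfold Spec_map_k_gram_to_blockers
  have hk : 1 ≤ k_gram.length := by
    cases k_gram with
    | nil => exact absurd rfl hpre.1
    | cons a t => simp
  by_cases hd : data = []
  · subst hd
    rw [pv_portA_eq]
    have h1 : pvCnfA k_gram [] edges = PySem.Set.empty := by
      unfold pvCnfA
      rw [pvF_nil, PySem.List.pyRange_one_eq_nil (by simp only [PySem.List.len_eq]; simp; omega)]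
      rfl
    rw [h1]
    rfl
  · rw [pv_portA_eq, pv_portK_eq k_gram data edges hd]
    have hperm : (PySem.Set.ofList (pvCnfA k_gram data edges)).Perm (pvCnfK k_gram data edges) := by
      rw [List.perm_ext_iff_of_nodup (PySem.Set.nodup_ofList _) (pv_nodup_K k_gram data edges)]
      intro c
      rw [PySem.Set.mem_ofList, pv_mem_iff k_gram data edges hk c, pv_memB_char,
        pv_memK_char k_gram data edges hk]
      constructor
      · rintro ⟨datum, hdm, rest⟩
        exact ⟨datum, hdm, (pv_bridge k_gram edges datum hk c).mpr rest⟩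
      · rintro ⟨datum, hdm, rest⟩
        exact ⟨datum, hdm, (pv_bridge k_gram edges datum hk c).mp rest⟩
    have hsorted : PySem.List.sorted (PySem.Set.ofList (pvCnfA k_gram data edges)) (fun x => x) false
        = PySem.List.sorted (pvCnfK k_gram data edges) (fun x => x) false :=
      calc PySem.List.sorted (PySem.Set.ofList (pvCnfA k_gram data edges)) (fun x => x) false
          = @PySem.List.sorted _ _ _ LinearOrder.toDecidableLT (PySem.Set.ofList (pvCnfA k_gram data edges)) (fun x => x) false :=
            pv_sorted_dec_irrel _ _ _ _ _
        _ = @PySem.List.sorted _ _ _ LinearOrder.toDecidableLT (pvCnfK k_gram data edges) (fun x => x) false :=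
            PySem.List.sorted_eq_sorted_of_perm _ _ _ (fun _ _ h => h) hperm
        _ = PySem.List.sorted (pvCnfK k_gram data edges) (fun x => x) false :=
            (pv_sorted_dec_irrel _ _ _ _ _).symm
    rw [hsorted]
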